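-- pv_equiv track=rewrite | github.com/Albertlungu/TorchRoyale | scripts/patch_player_elixir_from_video.py | fill_nearest
-- ===== SOURCE A (Python) =====
-- from typing import List, Optional
--
-- def fill_nearest(detected: List[Optional[int]]) -> List[Optional[int]]:
--     """Fill None entries using the nearest detected value (neighbour interpolation)."""
--     n = len(detected)
--     out = detected.copy()
--     known = [i for i, v in enumerate(detected) if v is not None]
--     if not known:
--         return out
--     for idx in range(n):
--         if out[idx] is not None:
--             continue
--         prev = max((k for k in known if k < idx), default=None)
--         nxt = min((k for k in known if k > idx), default=None)
--         if prev is None: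
--             out[idx] = out[nxt]
--         elif nxt is None:
--             out[idx] = out[prev]
--         else:
--             # pick whichever anchor is closer
--             out[idx] = out[prev] if (idx - prev) <= (nxt - idx) else out[nxt]
--     return out
-- ===== SOURCE B (Python) =====
-- from typing import List, Optional
--
-- def fill_nearest(detected: List[Optional[int]]) -> List[Optional[int]]:
--     """Fill None entries with the nearest detected value: two linear scans
--     (nearest-known-on-the-left and nearest-known-on-the-right), then combine."""
--     n = len(detected)
--     prevs = []
--     last = None
--     for i, v in enumerate(detected):
--         if v is not None:
--             last = (i, v)
--         prevs.append(last)
--     nexts = [None] * n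
--     nxt = None
--     for i in range(n - 1, -1, -1):
--         v = detected[i]
--         if v is not None:
--             nxt = (i, v)
--         nexts[i] = nxt
--     out = []
--     for i, v in enumerate(detected):
--         if v is not None:
--             out.append(v)
--             continue
--         p, q = prevs[i], nexts[i]
--         if p is None and q is None:
--             out.append(None)
--         elif p is None:
--             out.append(q[1])
--         elif q is None:
--             out.append(p[1])
--         else:
--             out.append(p[1] if i - p[0] <= q[0] - i else q[1])
--     return out
-- ===== Notes on version B (the rewrite author's own statement) =====
-- stated objective: faster
-- what changed: replaced the per-None-index scans over the full known-index list (max/min of filtered generators) with two linear sweeps that precompute the nearest known value on each side, then a single combining pass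
import Mathlib
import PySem

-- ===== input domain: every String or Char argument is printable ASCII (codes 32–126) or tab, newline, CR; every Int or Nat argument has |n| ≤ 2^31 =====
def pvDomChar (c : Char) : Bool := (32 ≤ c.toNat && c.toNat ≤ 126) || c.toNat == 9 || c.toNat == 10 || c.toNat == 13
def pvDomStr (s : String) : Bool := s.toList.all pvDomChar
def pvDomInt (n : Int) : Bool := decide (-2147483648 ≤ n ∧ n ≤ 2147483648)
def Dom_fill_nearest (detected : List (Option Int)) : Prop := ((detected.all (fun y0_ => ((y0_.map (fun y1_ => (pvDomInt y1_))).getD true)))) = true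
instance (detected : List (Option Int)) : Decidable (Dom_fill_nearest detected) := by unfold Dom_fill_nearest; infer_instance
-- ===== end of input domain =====

-- B replaces A's per-None-index scans over the known-index list with two linear
-- nearest-known sweeps (left and right) and one combining pass; same return value.

-- ===== PORT A =====
-- literal transliteration of A: out = copy, known = [i for i,v in enumerate(detected) if v is not None],
-- then for idx in range(n) fill each None from max(known < idx) / min(known > idx).
def fill_nearest (detected : List (Option Int)) : List (Option Int) :=
  let n := detected.length
  let out := detected
  let known : List Int :=
    ((PySem.List.enumerate detected 0).filter (fun p => p.2.isSome)).map (fun p => p.1)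
  if known = [] then out
  else
    (PySem.List.pyRange 0 (n : Int) 1).foldl (fun out idx =>
      if (PySem.List.pyGetD out idx none).isSome then out
      else
        let prev := PySem.List.max? (known.filter (fun k => k < idx)) (fun k => k)
        let nxt := PySem.List.min? (known.filter (fun k => idx < k)) (fun k => k)
        match prev, nxt with
        | none, none => out   -- unreachable (known ≠ []); Python would raise here
        | none, some nx => PySem.List.pySetD out idx (PySem.List.pyGetD out nx none)
        | some pv, none => PySem.List.pySetD out idx (PySem.List.pyGetD out pv none)
        | some pv, some nx =>
            PySem.List.pySetD out idx
              (if idx - pv ≤ nx - idx then PySem.List.pyGetD out pv none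
               else PySem.List.pyGetD out nx none)) out

-- ===== PORT B =====
-- forward sweep: for each position, the nearest known (index, value) at or before it
def prevScan : List (Option Int) → Int → Option (Int × Int) → List (Option (Int × Int))
  | [], _, _ => []
  | v :: rest, i, last =>
    let cur := match v with
      | some x => some (i, x)
      | none => last
    cur :: prevScan rest (i + 1) cur

-- backward sweep: for each position, the nearest known (index, value) at or after it
def nextScan : List (Option Int) → Int → List (Option (Int × Int))
  | [], _ => []
  | v :: rest, i =>
    let tail := nextScan rest (i + 1)
    (match v with
     | some x => some (i, x)
     | none => tail.headD none) :: tail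

def combineNear (i : Int) (v : Option Int) (p q : Option (Int × Int)) : Option Int :=
  match v with
  | some x => some x
  | none =>
    match p, q with
    | none, none => none
    | none, some qq => some qq.2
    | some pp, none => some pp.2
    | some pp, some qq => if i - pp.1 ≤ qq.1 - i then some pp.2 else some qq.2

def zipNear : Int → List (Option Int) → List (Option (Int × Int)) → List (Option (Int × Int)) → List (Option Int)
  | _, [], _, _ => []
  | _, _ :: _, [], _ => []
  | _, _ :: _, _ :: _, [] => []
  | i, v :: vs, p :: ps, q :: qs => combineNear i v p q :: zipNear (i + 1) vs ps qs

def fill_nearest_alt (detected : List (Option Int)) : List (Option Int) :=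
  zipNear 0 detected (prevScan detected 0 none) (nextScan detected 0)

-- ===== PRECONDITION & SPEC =====
def Spec_fill_nearest (detected : List (Option Int)) (out : List (Option Int)) : Prop := out = fill_nearest_alt detected
instance (detected : List (Option Int)) (out : List (Option Int)) : Decidable (Spec_fill_nearest detected out) := by unfold Spec_fill_nearest; infer_instance

-- ===== CLAIM (what is proved, stated in full; the proofs are below) =====
def Claim_equal_fill_nearest : Prop := ∀ (detected : List (Option Int)), Dom_fill_nearest detected → Spec_fill_nearest detected (fill_nearest detected)

-- ===== LEMMAS AND PROOFS =====

-- indices of the non-None entries, as Nats, in increasing order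
def knownN : List (Option Int) → List Nat
  | [] => []
  | v :: rest => (if v.isSome then [0] else []) ++ (knownN rest).map (· + 1)

-- the value stored at a known index
def unwrap (xs : List (Option Int)) (k : Nat) : Int := ((xs.getD k none).getD 0)

-- nearest known at-or-before / at-or-after j, as (index, value)
def prevOpt (xs : List (Option Int)) (j : Nat) : Option (Int × Int) :=
  (((knownN xs).filter (fun k => k ≤ j)).getLast?).map (fun k => (Int.ofNat k, unwrap xs k))
def nextOpt (xs : List (Option Int)) (j : Nat) : Option (Int × Int) :=
  (((knownN xs).filter (fun k => j ≤ k)).head?).map (fun k => (Int.ofNat k, unwrap xs k))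

theorem mem_knownN (xs : List (Option Int)) (k : Nat) :
    k ∈ knownN xs ↔ k < xs.length ∧ (xs.getD k none).isSome := by
  induction xs generalizing k with
  | nil => simp [knownN]
  | cons v rest ih =>
    cases k with
    | zero => cases v <;> simp [knownN]
    | succ k' => cases v <;> simp [knownN, ih]

theorem pairwise_knownN (xs : List (Option Int)) : (knownN xs).Pairwise (· < ·) := by
  induction xs with
  | nil => simp [knownN]
  | cons v rest ih =>
    cases v <;> simp_all [knownN, List.pairwise_map, List.pairwise_cons]

theorem length_prevScan (xs : List (Option Int)) (i : Int) (last : Option (Int × Int)) :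
    (prevScan xs i last).length = xs.length := by
  induction xs generalizing i last with
  | nil => simp [prevScan]
  | cons v rest ih => simp [prevScan, ih]

theorem length_nextScan (xs : List (Option Int)) (i : Int) :
    (nextScan xs i).length = xs.length := by
  induction xs generalizing i with
  | nil => simp [nextScan]
  | cons v rest ih => simp [nextScan, ih]

theorem prevScan_getD (xs : List (Option Int)) (i0 : Int) (last : Option (Int × Int))
    (j : Nat) (hj : j < xs.length) :
    (prevScan xs i0 last).getD j none =
      match ((knownN xs).filter (fun k => k ≤ j)).getLast? with
      | some k => some (i0 + Int.ofNat k, unwrap xs k)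
      | none => last := by
  induction xs generalizing i0 last j with
  | nil => simp at hj
  | cons v rest ih =>
    cases j with
    | zero =>
      have hfilt : (knownN (v :: rest)).filter (fun k => decide (k ≤ 0)) =
          if v.isSome then [0] else [] := by
        cases v <;> simp [knownN, List.filter_map, Function.comp]
      simp only [prevScan, List.getD_cons_zero]
      rw [hfilt]
      cases v with
      | some x => simp [unwrap]
      | none => simp
    | succ j' =>
      have hj' : j' < rest.length := by simpa using hj
      have hmap : ((knownN rest).map (· + 1)).filter (fun k => decide (k ≤ j' + 1)) =
          ((knownN rest).filter (fun k => decide (k ≤ j'))).map (· + 1) := by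
        rw [List.filter_map]
        congr 1
        apply List.filter_congr
        intro a _
        simp
      have hfilt : (knownN (v :: rest)).filter (fun k => decide (k ≤ j' + 1)) =
          (if v.isSome then [0] else []) ++
            ((knownN rest).filter (fun k => decide (k ≤ j'))).map (· + 1) := by
        cases v <;> simp [knownN, ← hmap]
      simp only [prevScan, List.getD_cons_succ]
      rw [ih _ _ _ hj', hfilt, List.getLast?_append, List.getLast?_map]
      cases hL : ((knownN rest).filter (fun k => decide (k ≤ j'))).getLast? with
      | some k =>
        simp [unwrap]
        omega
      | none =>
        cases v with
        | some x => simp [unwrap]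
        | none => simp

theorem nextScan_getD (xs : List (Option Int)) (i0 : Int) (j : Nat) (hj : j < xs.length) :
    (nextScan xs i0).getD j none =
      (((knownN xs).filter (fun k => j ≤ k)).head?).map (fun k => (i0 + Int.ofNat k, unwrap xs k)) := by
  induction xs generalizing i0 j with
  | nil => simp at hj
  | cons v rest ih =>
    have hheadD : ∀ (l : List (Option (Int × Int))), l.headD none = l.getD 0 none := by
      intro l; cases l <;> rfl
    cases j with
    | zero =>
      cases v with
      | some x => simp [nextScan, knownN, unwrap]
      | none =>
        simp only [nextScan, List.getD_cons_zero, hheadD]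
        cases rest with
        | nil => simp [nextScan, knownN]
        | cons w rest' =>
          rw [ih (i0 + 1) 0 (by simp)]
          have hk : knownN (none :: w :: rest') = (knownN (w :: rest')).map (· + 1) := by
            simp [knownN]
          rw [hk]
          have h1 : ∀ (l : List Nat), l.filter (fun k => decide (0 ≤ k)) = l := by
            intro l; apply List.filter_eq_self.mpr; intro a _; simp
          rw [h1, h1, List.head?_map, Option.map_map]
          cases (knownN (w :: rest')).head? with
          | none => simp
          | some k => simp [unwrap]; omega
    | succ j' =>
      have hj' : j' < rest.length := by simpa using hj
      have hmap : ((knownN rest).map (· + 1)).filter (fun k => decide (j' + 1 ≤ k)) =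
          ((knownN rest).filter (fun k => decide (j' ≤ k))).map (· + 1) := by
        rw [List.filter_map]
        congr 1
        apply List.filter_congr
        intro a _
        simp
      have hfilt : (knownN (v :: rest)).filter (fun k => decide (j' + 1 ≤ k)) =
          ((knownN rest).filter (fun k => decide (j' ≤ k))).map (· + 1) := by
        cases v <;> simp [knownN, ← hmap]
      simp only [nextScan, List.getD_cons_succ]
      rw [ih _ _ hj', hfilt, List.head?_map, Option.map_map]
      cases ((knownN rest).filter (fun k => decide (j' ≤ k))).head? with
      | none => simp
      | some k => simp [unwrap]; omega

theorem length_zipNear (xs : List (Option Int)) (ps qs : List (Option (Int × Int))) (i0 : Int)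
    (hp : ps.length = xs.length) (hq : qs.length = xs.length) :
    (zipNear i0 xs ps qs).length = xs.length := by
  induction xs generalizing ps qs i0 with
  | nil => simp [zipNear]
  | cons v vs ih =>
    cases ps with
    | nil => simp at hp
    | cons p ps' =>
      cases qs with
      | nil => simp at hq
      | cons q qs' => simp [zipNear, ih _ _ _ (by simpa using hp) (by simpa using hq)]

theorem zipNear_getD (xs : List (Option Int)) (ps qs : List (Option (Int × Int))) (i0 : Int)
    (j : Nat) (hj : j < xs.length) (hp : ps.length = xs.length) (hq : qs.length = xs.length) :
    (zipNear i0 xs ps qs).getD j none =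
      combineNear (i0 + Int.ofNat j) (xs.getD j none) (ps.getD j none) (qs.getD j none) := by
  induction xs generalizing ps qs i0 j with
  | nil => simp at hj
  | cons v vs ih =>
    cases ps with
    | nil => simp at hp
    | cons p ps' =>
      cases qs with
      | nil => simp at hq
      | cons q qs' =>
        cases j with
        | zero => simp [zipNear]
        | succ j' =>
          simp only [zipNear, List.getD_cons_succ]
          rw [ih _ _ _ _ (by simpa using hj) (by simpa using hp) (by simpa using hq)]
          have harith : i0 + 1 + Int.ofNat j' = i0 + Int.ofNat (j' + 1) := by
            simp only [Int.ofNat_eq_natCast]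
            omega
          rw [harith]

theorem length_alt (xs : List (Option Int)) : (fill_nearest_alt xs).length = xs.length := by
  unfold fill_nearest_alt
  exact length_zipNear _ _ _ _ (length_prevScan _ _ _) (length_nextScan _ _)

theorem alt_getD (xs : List (Option Int)) (j : Nat) (hj : j < xs.length) :
    (fill_nearest_alt xs).getD j none =
      combineNear (j : Int) (xs.getD j none) (prevOpt xs j) (nextOpt xs j) := by
  unfold fill_nearest_alt
  rw [zipNear_getD _ _ _ _ _ hj (length_prevScan _ _ _) (length_nextScan _ _)]
  rw [prevScan_getD _ _ _ _ hj, nextScan_getD _ _ _ hj]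
  unfold prevOpt nextOpt
  cases ((knownN xs).filter (fun k => decide (k ≤ j))).getLast? <;>
    cases ((knownN xs).filter (fun k => decide (j ≤ k))).head? <;>
      simp [Int.ofNat_eq_natCast]

theorem alt_known (xs : List (Option Int)) (j : Nat) (hj : j < xs.length)
    (h : (xs.getD j none).isSome) :
    (fill_nearest_alt xs).getD j none = xs.getD j none := by
  rw [alt_getD xs j hj]
  cases hv : xs.getD j none with
  | none => rw [hv] at h; simp at h
  | some x => simp [combineNear]

theorem knownA_eq (xs : List (Option Int)) (s : Int) :
    ((PySem.List.enumerate xs s).filter (fun p => p.2.isSome)).map (fun p => p.1) =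
      (knownN xs).map (fun k => s + Int.ofNat k) := by
  induction xs generalizing s with
  | nil => simp [PySem.List.enumerate_nil, knownN]
  | cons v rest ih =>
    have hcomm : (knownN rest).map (fun k => (s + 1) + Int.ofNat k) =
        ((knownN rest).map (· + 1)).map (fun k => s + Int.ofNat k) := by
      rw [List.map_map]
      apply List.map_congr_left
      intro a _
      simp only [Function.comp_apply, Int.ofNat_eq_natCast]
      push_cast
      ring
    cases v with
    | some x =>
      rw [PySem.List.enumerate_cons]
      have h1 : ((s, (some x : Option Int)) :: PySem.List.enumerate rest (s + 1)).filter
            (fun p => p.2.isSome)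
          = (s, (some x : Option Int)) ::
              (PySem.List.enumerate rest (s + 1)).filter (fun p => p.2.isSome) := by
        simp
      rw [h1, List.map_cons, ih]
      have h2 : knownN (some x :: rest) = 0 :: (knownN rest).map (· + 1) := by simp [knownN]
      rw [h2, List.map_cons, hcomm]
      simp
    | none =>
      rw [PySem.List.enumerate_cons]
      have h1 : ((s, (none : Option Int)) :: PySem.List.enumerate rest (s + 1)).filter
            (fun p => p.2.isSome)
          = (PySem.List.enumerate rest (s + 1)).filter (fun p => p.2.isSome) := by
        simp
      rw [h1, ih]
      have h2 : knownN (none :: rest) = (knownN rest).map (· + 1) := by simp [knownN]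
      rw [h2, hcomm]

theorem le_getLast_sorted (l : List Int) (h : l.Pairwise (· < ·)) (y : Int) (hy : y ∈ l)
    (hne : l ≠ []) : y ≤ l.getLast hne := by
  induction l generalizing y with
  | nil => simp at hy
  | cons a t ih =>
    rcases List.mem_cons.mp hy with rfl | hy'
    · cases t with
      | nil => simp
      | cons b t' =>
        rw [List.getLast_cons (by simp)]
        have hb : y < b := (List.pairwise_cons.mp h).1 b (by simp)
        have hble := ih (List.pairwise_cons.mp h).2 b (by simp) (by simp)
        omega
    · cases t with
      | nil => simp at hy'
      | cons b t' =>
        rw [List.getLast_cons (by simp)]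
        exact ih (List.pairwise_cons.mp h).2 y hy' (by simp)

theorem head_le_sorted (l : List Int) (h : l.Pairwise (· < ·)) (y : Int) (hy : y ∈ l)
    (hne : l ≠ []) : l.head hne ≤ y := by
  cases l with
  | nil => simp at hy
  | cons a t =>
    rcases List.mem_cons.mp hy with rfl | hy'
    · simp
    · have := (List.pairwise_cons.mp h).1 y hy'
      simp only [List.head_cons]
      omega

theorem max?_sorted (l : List Int) (h : l.Pairwise (· < ·)) :
    PySem.List.max? l (fun k => k) = l.getLast? := by
  match l with
  | [] => simp [PySem.List.max?_eq_none_iff]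
  | a :: t =>
    have hne : a :: t ≠ [] := by simp
    cases hmx : PySem.List.max? (a :: t) (fun k => k) with
    | none => exact absurd ((PySem.List.max?_eq_none_iff _ _).mp hmx) hne
    | some m =>
      have hmem := PySem.List.max?_mem hmx
      have hmax := PySem.List.max?_isMax hmx
      have h1 : (a :: t).getLast hne ≤ m := hmax _ (List.getLast_mem hne)
      have h2 : m ≤ (a :: t).getLast hne := le_getLast_sorted _ h m hmem hne
      rw [List.getLast?_eq_some_getLast hne]
      exact congrArg some (le_antisymm h2 h1)

theorem min?_sorted (l : List Int) (h : l.Pairwise (· < ·)) :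
    PySem.List.min? l (fun k => k) = l.head? := by
  match l with
  | [] => simp [PySem.List.min?_eq_none_iff]
  | a :: t =>
    have hne : a :: t ≠ [] := by simp
    cases hmx : PySem.List.min? (a :: t) (fun k => k) with
    | none => exact absurd ((PySem.List.min?_eq_none_iff _ _).mp hmx) hne
    | some m =>
      have hmem := PySem.List.min?_mem hmx
      have hmin := PySem.List.min?_isMin hmx
      have h1 : m ≤ (a :: t).head hne := hmin _ (List.head_mem hne)
      have h2 : (a :: t).head hne ≤ m := head_le_sorted _ h m hmem hne
      rw [List.head?_eq_some_head hne]
      exact congrArg some (le_antisymm h1 h2)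

theorem getD_known_eq (xs : List (Option Int)) (k : Nat) (hk : k ∈ knownN xs) :
    xs.getD k none = some (unwrap xs k) := by
  have hs := ((mem_knownN xs k).mp hk).2
  cases h : xs.getD k none with
  | none => rw [h] at hs; simp at hs
  | some x =>
    congr 1
    simp only [unwrap, h, Option.getD_some]

theorem take_alt_length (xs : List (Option Int)) (m : Nat) (hm : m ≤ xs.length) :
    ((fill_nearest_alt xs).take m).length = m := by
  simp [List.length_take, length_alt xs]
  omega

theorem mix_getD_ge (xs : List (Option Int)) (m k : Nat) (hm : m ≤ xs.length) (hmk : m ≤ k) :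
    ((fill_nearest_alt xs).take m ++ xs.drop m).getD k none = xs.getD k none := by
  rw [List.getD_eq_getElem?_getD, List.getD_eq_getElem?_getD,
    List.getElem?_append_right (by rw [take_alt_length xs m hm]; omega),
    take_alt_length xs m hm, List.getElem?_drop]
  congr 2
  omega

theorem mix_getD_known (xs : List (Option Int)) (m k : Nat) (hm : m ≤ xs.length)
    (hk : k ∈ knownN xs) :
    ((fill_nearest_alt xs).take m ++ xs.drop m).getD k none = xs.getD k none := by
  rcases Nat.lt_or_ge k m with hkm | hkm
  · have h1 : ((fill_nearest_alt xs).take m ++ xs.drop m).getD k none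
        = (fill_nearest_alt xs).getD k none := by
      rw [List.getD_eq_getElem?_getD, List.getD_eq_getElem?_getD,
        List.getElem?_append_left (by rw [take_alt_length xs m hm]; omega),
        List.getElem?_take, if_pos hkm]
    rw [h1]
    exact alt_known xs k ((mem_knownN xs k).mp hk).1 ((mem_knownN xs k).mp hk).2
  · exact mix_getD_ge xs m k hm hkm

theorem mix_set (xs : List (Option Int)) (m : Nat) (hm : m < xs.length) (v : Option Int) :
    PySem.List.pySetD ((fill_nearest_alt xs).take m ++ xs.drop m) ((m : Nat) : Int) v
      = (fill_nearest_alt xs).take m ++ v :: xs.drop (m + 1) := by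
  rw [PySem.List.pySetD_natCast, List.set_append, take_alt_length xs m (le_of_lt hm),
    if_neg (lt_irrefl m), Nat.sub_self, List.drop_eq_getElem_cons hm]
  rfl

theorem mix_succ (xs : List (Option Int)) (m : Nat) (hm : m < xs.length) :
    (fill_nearest_alt xs).take (m + 1) ++ xs.drop (m + 1)
      = (fill_nearest_alt xs).take m ++
          (fill_nearest_alt xs).getD m none :: xs.drop (m + 1) := by
  have hm' : m < (fill_nearest_alt xs).length := by rw [length_alt]; exact hm
  have h1 : (fill_nearest_alt xs).getD m none = (fill_nearest_alt xs)[m] := by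
    rw [List.getD_eq_getElem?_getD, List.getElem?_eq_getElem hm']
    rfl
  rw [h1, List.take_add_one, List.getElem?_eq_getElem hm']
  simp only [Option.toList_some, List.append_assoc, List.cons_append, List.nil_append]

theorem pairwise_map_ofNat (l : List Nat) (h : l.Pairwise (· < ·)) :
    (l.map Int.ofNat).Pairwise (· < ·) := by
  rw [List.pairwise_map]
  apply List.Pairwise.imp ?_ h
  intro a b hab
  simp only [Int.ofNat_eq_natCast]
  exact_mod_cast hab

theorem maxA (xs : List (Option Int)) (m : Nat) :
    PySem.List.max? (((knownN xs).map Int.ofNat).filter (fun j => decide (j < ((m : Nat) : Int))))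
        (fun j => j)
      = (((knownN xs).filter (fun k => decide (k < m))).getLast?).map Int.ofNat := by
  have hpred : ((knownN xs).filter ((fun j => decide (j < ((m : Nat) : Int))) ∘ Int.ofNat))
      = (knownN xs).filter (fun k => decide (k < m)) := by
    apply List.filter_congr
    intro a _
    simp [Int.ofNat_eq_natCast]
  rw [List.filter_map, hpred,
    max?_sorted _ (pairwise_map_ofNat _ ((pairwise_knownN xs).filter _)), List.getLast?_map]

theorem minA (xs : List (Option Int)) (m : Nat) :
    PySem.List.min? (((knownN xs).map Int.ofNat).filter (fun j => decide (((m : Nat) : Int) < j)))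
        (fun j => j)
      = (((knownN xs).filter (fun k => decide (m < k))).head?).map Int.ofNat := by
  have hpred : ((knownN xs).filter ((fun j => decide (((m : Nat) : Int) < j)) ∘ Int.ofNat))
      = (knownN xs).filter (fun k => decide (m < k)) := by
    apply List.filter_congr
    intro a _
    simp [Int.ofNat_eq_natCast]
  rw [List.filter_map, hpred,
    min?_sorted _ (pairwise_map_ofNat _ ((pairwise_knownN xs).filter _)), List.head?_map]

theorem filter_le_eq_lt (xs : List (Option Int)) (m : Nat) (hm : xs.getD m none = none) :
    (knownN xs).filter (fun k => decide (k ≤ m)) = (knownN xs).filter (fun k => decide (k < m)) := by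
  apply List.filter_congr
  intro a ha
  have hne : a ≠ m := by
    rintro rfl
    have := ((mem_knownN xs a).mp ha).2
    rw [hm] at this
    simp at this
  rw [decide_eq_decide]
  omega

theorem filter_ge_eq_gt (xs : List (Option Int)) (m : Nat) (hm : xs.getD m none = none) :
    (knownN xs).filter (fun k => decide (m ≤ k)) = (knownN xs).filter (fun k => decide (m < k)) := by
  apply List.filter_congr
  intro a ha
  have hne : a ≠ m := by
    rintro rfl
    have := ((mem_knownN xs a).mp ha).2
    rw [hm] at this
    simp at this
  rw [decide_eq_decide]
  omega

theorem alt_of_no_known (xs : List (Option Int)) (hk : knownN xs = []) :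
    fill_nearest_alt xs = xs := by
  apply List.ext_getElem (length_alt xs)
  intro i h1 h2
  have hgd := alt_getD xs i h2
  simp only [prevOpt, nextOpt, hk, List.filter_nil, List.getLast?_nil, List.head?_nil,
    Option.map_none] at hgd
  have hcomb : ∀ (j : Int) (v : Option Int), combineNear j v none none = v := by
    intro j v
    cases v <;> rfl
  rw [hcomb] at hgd
  rw [List.getD_eq_getElem _ _ h1, List.getD_eq_getElem _ _ h2] at hgd
  exact hgd

theorem fill_eq_alt (xs : List (Option Int)) : fill_nearest xs = fill_nearest_alt xs := by
  simp only [fill_nearest]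
  rw [knownA_eq]
  have hzero : (knownN xs).map (fun k => (0 : Int) + Int.ofNat k) = (knownN xs).map Int.ofNat := by
    apply List.map_congr_left
    intro a _
    omega
  rw [hzero]
  by_cases hk : knownN xs = []
  · rw [hk]
    simp only [List.map_nil, reduceIte]
    exact (alt_of_no_known xs hk).symm
  · have hne : (knownN xs).map Int.ofNat ≠ [] := by simpa using hk
    rw [if_neg hne, PySem.List.pyRange_zero_natCast, List.foldl_map]
    have key : ∀ (m : Nat), m ≤ xs.length →
        (List.range m).foldl (fun (out : List (Option Int)) (k : Nat) =>
          if (PySem.List.pyGetD out ((k : Nat) : Int) none).isSome then out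
          else
            let prev := PySem.List.max?
              (((knownN xs).map Int.ofNat).filter (fun j => j < ((k : Nat) : Int))) (fun j => j)
            let nxt := PySem.List.min?
              (((knownN xs).map Int.ofNat).filter (fun j => ((k : Nat) : Int) < j)) (fun j => j)
            match prev, nxt with
            | none, none => out
            | none, some nx => PySem.List.pySetD out ((k : Nat) : Int)
                (PySem.List.pyGetD out nx none)
            | some pv, none => PySem.List.pySetD out ((k : Nat) : Int)
                (PySem.List.pyGetD out pv none)
            | some pv, some nx =>
                PySem.List.pySetD out ((k : Nat) : Int)
                  (if ((k : Nat) : Int) - pv ≤ nx - ((k : Nat) : Int) then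
                    PySem.List.pyGetD out pv none
                   else PySem.List.pyGetD out nx none)) xs
          = (fill_nearest_alt xs).take m ++ xs.drop m := by
      intro m
      induction m with
      | zero => intro _; simp
      | succ m ihm =>
        intro hm1
        have hmlt : m < xs.length := hm1
        rw [List.range_succ, List.foldl_append, ihm (le_of_lt hmlt)]
        simp only [List.foldl_cons, List.foldl_nil]
        have hself : PySem.List.pyGetD ((fill_nearest_alt xs).take m ++ xs.drop m)
            ((m : Nat) : Int) none = xs.getD m none := by
          rw [PySem.List.pyGetD_natCast]
          exact mix_getD_ge xs m m (le_of_lt hmlt) le_rfl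
        rw [hself]
        cases hv : xs.getD m none with
        | some x =>
          simp only [Option.isSome_some, if_true]
          rw [mix_succ xs m hmlt, alt_known xs m hmlt (by rw [hv]; rfl), hv]
          congr 1
          rw [List.drop_eq_getElem_cons hmlt]
          congr 1
          rw [← List.getD_eq_getElem xs none hmlt, hv]
        | none =>
          simp only [Option.isSome_none, Bool.false_eq_true, if_false]
          rw [maxA xs m, minA xs m]
          have halt : (fill_nearest_alt xs).getD m none =
              combineNear ((m : Nat) : Int) none
                ((((knownN xs).filter (fun k => decide (k < m))).getLast?).map
                  (fun k => (Int.ofNat k, unwrap xs k)))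
                ((((knownN xs).filter (fun k => decide (m < k))).head?).map
                  (fun k => (Int.ofNat k, unwrap xs k))) := by
            rw [alt_getD xs m hmlt, hv]
            simp only [prevOpt, nextOpt, filter_le_eq_lt xs m hv, filter_ge_eq_gt xs m hv]
          rw [mix_succ xs m hmlt, halt]
          cases hP : ((knownN xs).filter (fun k => decide (k < m))).getLast? with
          | none =>
            cases hQ : ((knownN xs).filter (fun k => decide (m < k))).head? with
            | none =>
              simp only [Option.map_none, combineNear]
              congr 1
              rw [List.drop_eq_getElem_cons hmlt]
              congr 1
              rw [← List.getD_eq_getElem xs none hmlt, hv]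
            | some q =>
              have hqf : q ∈ (knownN xs).filter (fun k => decide (m < k)) :=
                List.mem_of_mem_head? (by rw [hQ]; rfl)
              have hqk : q ∈ knownN xs := (List.mem_filter.mp hqf).1
              simp only [Option.map_none, Option.map_some, combineNear]
              rw [mix_set xs m hmlt]
              congr 2
              rw [Int.ofNat_eq_natCast, PySem.List.pyGetD_natCast,
                mix_getD_known xs m q (le_of_lt hmlt) hqk, getD_known_eq xs q hqk]
          | some p =>
            have hpf : p ∈ (knownN xs).filter (fun k => decide (k < m)) :=
              List.mem_of_mem_getLast? (by rw [hP]; rfl)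
            have hpk : p ∈ knownN xs := (List.mem_filter.mp hpf).1
            cases hQ : ((knownN xs).filter (fun k => decide (m < k))).head? with
            | none =>
              simp only [Option.map_none, Option.map_some, combineNear]
              rw [mix_set xs m hmlt]
              congr 2
              rw [Int.ofNat_eq_natCast, PySem.List.pyGetD_natCast,
                mix_getD_known xs m p (le_of_lt hmlt) hpk, getD_known_eq xs p hpk]
            | some q =>
              have hqf : q ∈ (knownN xs).filter (fun k => decide (m < k)) :=
                List.mem_of_mem_head? (by rw [hQ]; rfl)
              have hqk : q ∈ knownN xs := (List.mem_filter.mp hqf).1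
              simp only [Option.map_some, combineNear]
              rw [mix_set xs m hmlt]
              congr 2
              by_cases hc : ((m : Nat) : Int) - Int.ofNat p ≤ Int.ofNat q - ((m : Nat) : Int)
              · rw [if_pos hc, if_pos hc, Int.ofNat_eq_natCast, PySem.List.pyGetD_natCast,
                  mix_getD_known xs m p (le_of_lt hmlt) hpk, getD_known_eq xs p hpk]
              · rw [if_neg hc, if_neg hc, Int.ofNat_eq_natCast, PySem.List.pyGetD_natCast,
                  mix_getD_known xs m q (le_of_lt hmlt) hqk, getD_known_eq xs q hqk]
    have h2 := key xs.length le_rfl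
    rw [List.drop_length, List.append_nil,
      List.take_of_length_le (le_of_eq (length_alt xs))] at h2
    exact h2

-- ===== VERDICT (by name: the statement is the Claim_ definition above) =====
theorem fill_nearest_spec : Claim_equal_fill_nearest := by
  intro detected _
  unfold Spec_fill_nearest
  exact fill_eq_alt detected
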